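-- pv_equiv track=rewrite | github.com/mongodb/mongo | site_scons/mongo/platform.py | is_os_raw
-- ===== SOURCE A (Python) =====
-- def is_os_raw(target_os, os_list_to_check):
--     darwin_os_list = [ 'macOS', 'tvOS', 'tvOS-sim', 'iOS', 'iOS-sim', 'watchOS', 'watchOS-sim' ]
--     linux_os_list = [ 'android', 'linux' ]
--     posix_os_list = [ 'openbsd', 'freebsd', 'solaris' ] + darwin_os_list + linux_os_list
--
--     os_families = {
--             "darwin": darwin_os_list,
--             "posix": posix_os_list,
--             "linux": linux_os_list,
--     }
--
--     for os in os_list_to_check: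
--         if os == target_os or ( os in os_families and target_os in os_families[os] ):
--             return True
--     return False
-- ===== SOURCE B (Python) =====
-- def is_os_raw(target_os, os_list_to_check):
--     darwin_os_list = [ 'macOS', 'tvOS', 'tvOS-sim', 'iOS', 'iOS-sim', 'watchOS', 'watchOS-sim' ]
--     linux_os_list = [ 'android', 'linux' ]
--     posix_os_list = [ 'openbsd', 'freebsd', 'solaris' ] + darwin_os_list + linux_os_list
--
--     os_families = {
--             "darwin": darwin_os_list,
--             "posix": posix_os_list,
--             "linux": linux_os_list,
--     }
--
--     # Reverse the lookup: which entry names would accept target_os?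
--     accepting = {target_os}
--     for family, members in os_families.items():
--         if target_os in members:
--             accepting.add(family)
--     return not accepting.isdisjoint(os_list_to_check)
-- ===== Notes on version B (the rewrite author's own statement) =====
-- stated objective: alternative
-- what changed: B inverts the index: instead of scanning the list and expanding each entry into its family, it precomputes in O(1) the small set of entry names that accept target_os (target_os itself plus each family containing it) and answers with one disjointness test against the list, so per-element work drops from a family expansion to one hashed membership check.
import Mathlib
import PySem

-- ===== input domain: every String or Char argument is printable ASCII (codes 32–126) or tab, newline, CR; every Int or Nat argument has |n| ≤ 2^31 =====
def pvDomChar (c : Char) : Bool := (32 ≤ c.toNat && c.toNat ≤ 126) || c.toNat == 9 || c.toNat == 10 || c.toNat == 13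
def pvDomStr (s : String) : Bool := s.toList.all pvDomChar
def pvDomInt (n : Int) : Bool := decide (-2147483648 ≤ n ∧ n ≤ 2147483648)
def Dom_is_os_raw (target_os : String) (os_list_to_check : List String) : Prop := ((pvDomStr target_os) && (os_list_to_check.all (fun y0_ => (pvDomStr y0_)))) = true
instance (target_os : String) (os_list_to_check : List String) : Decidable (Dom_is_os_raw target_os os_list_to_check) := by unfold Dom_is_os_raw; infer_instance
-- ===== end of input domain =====

-- B inverts the index: it precomputes the small set of entry names that accept target_os
-- (target_os itself plus every family containing it) and answers with one disjointness test
-- against the list. Objective: alternative.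

def pvDarwinList : List String := ["macOS", "tvOS", "tvOS-sim", "iOS", "iOS-sim", "watchOS", "watchOS-sim"]
def pvLinuxList : List String := ["android", "linux"]
def pvPosixList : List String := ["openbsd", "freebsd", "solaris"] ++ pvDarwinList ++ pvLinuxList
def pvOsFamilies : PySem.Dict String (List String) :=
  PySem.Dict.ofList [("darwin", pvDarwinList), ("posix", pvPosixList), ("linux", pvLinuxList)]

-- ===== PORT A =====
-- the 'for os in os_list_to_check: … return True' loop, as structural recursion
def isOsRawLoop (target_os : String) : List String → Bool
  | [] => false
  | os :: rest =>
      if os == target_os || (pvOsFamilies.contains os && (pvOsFamilies.getD os []).contains target_os)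
      then true
      else isOsRawLoop target_os rest

def is_os_raw (target_os : String) (os_list_to_check : List String) : Bool :=
  isOsRawLoop target_os os_list_to_check

-- ===== PORT B =====
-- accepting = {target_os}; for family, members in os_families.items(): if target_os in members: accepting.add(family)
-- return not accepting.isdisjoint(os_list_to_check)
def is_os_raw_alt (target_os : String) (os_list_to_check : List String) : Bool :=
  let accepting : PySem.Set String :=
    pvOsFamilies.items.foldl
      (fun s fm => if fm.2.contains target_os then PySem.Set.add s fm.1 else s)
      (PySem.Set.ofList [target_os])
  !(PySem.Set.isdisjoint accepting os_list_to_check)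

-- ===== PRECONDITION & SPEC =====
def Spec_is_os_raw (target_os : String) (os_list_to_check : List String) (out : Bool) : Prop := out = is_os_raw_alt target_os os_list_to_check
instance (target_os : String) (os_list_to_check : List String) (out : Bool) : Decidable (Spec_is_os_raw target_os os_list_to_check out) := by unfold Spec_is_os_raw; infer_instance

-- ===== CLAIM =====
def Claim_equal_is_os_raw : Prop := ∀ (target_os : String) (os_list_to_check : List String), Dom_is_os_raw target_os os_list_to_check → Spec_is_os_raw target_os os_list_to_check (is_os_raw target_os os_list_to_check)

-- ===== LEMMAS AND PROOFS =====

-- membership in B's folded accepting set, over any item list and start set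
theorem mem_fold_accepting (t x : String) (l : List (String × List String)) (s : PySem.Set String) :
    (x ∈ l.foldl (fun s fm => if fm.2.contains t then PySem.Set.add s fm.1 else s) s)
      ↔ x ∈ s ∨ ∃ fm ∈ l, fm.2.contains t = true ∧ x = fm.1 := by
  induction l generalizing s with
  | nil => simp
  | cons p ps ih =>
      simp only [List.foldl_cons]
      by_cases hp : p.2.contains t = true
      · rw [if_pos hp, ih]
        simp only [PySem.Set.mem_add, List.mem_cons]
        constructor
        · rintro (⟨hs | hx⟩ | ⟨fm, h1, h2, h3⟩)
          · exact Or.inl hs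
          · exact Or.inr ⟨p, Or.inl rfl, hp, hx⟩
          · exact Or.inr ⟨fm, Or.inr h1, h2, h3⟩
        · rintro (hs | ⟨fm, (rfl | h1), h2, h3⟩)
          · exact Or.inl (Or.inl hs)
          · exact Or.inl (Or.inr h3)
          · exact Or.inr ⟨fm, h1, h2, h3⟩
      · rw [if_neg hp, ih]
        simp only [List.mem_cons]
        constructor
        · rintro (hs | ⟨fm, h1, h2, h3⟩)
          · exact Or.inl hs
          · exact Or.inr ⟨fm, Or.inr h1, h2, h3⟩
        · rintro (hs | ⟨fm, (rfl | h1), h2, h3⟩)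
          · exact Or.inl hs
          · exact absurd h2 hp
          · exact Or.inr ⟨fm, h1, h2, h3⟩

-- A's loop as an existential
theorem isOsRawLoop_iff (t : String) (l : List String) :
    isOsRawLoop t l = true ↔
      ∃ os ∈ l, os = t ∨ (pvOsFamilies.contains os = true ∧ t ∈ pvOsFamilies.getD os []) := by
  induction l with
  | nil => simp [isOsRawLoop]
  | cons x xs ih =>
      simp only [isOsRawLoop]
      split_ifs with h
      · simp only [Bool.or_eq_true, beq_iff_eq, Bool.and_eq_true, List.contains_iff_mem] at h
        simp only [true_iff, List.mem_cons]
        exact ⟨x, Or.inl rfl, by tauto⟩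
      · simp only [Bool.or_eq_true, beq_iff_eq, Bool.and_eq_true, List.contains_iff_mem,
          not_or, not_and] at h
        rw [ih]
        simp only [List.mem_cons]
        constructor
        · rintro ⟨os, h1, h2⟩; exact ⟨os, Or.inr h1, h2⟩
        · rintro ⟨os, (rfl | h1), h2⟩
          · rcases h2 with rfl | ⟨h2, h3⟩
            · exact absurd rfl h.1
            · exact absurd h3 (h.2 h2)
          · exact ⟨os, h1, h2⟩

-- bridging a family item of pvOsFamilies.items with Dict lookup (the dict's keys are distinct literals)
theorem item_lookup (fm : String × List String) (h : fm ∈ pvOsFamilies.items) :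
    pvOsFamilies.contains fm.1 = true ∧ pvOsFamilies.getD fm.1 [] = fm.2 := by
  fin_cases h <;> exact ⟨by decide, by decide⟩

theorem lookup_item (os : String) (h : pvOsFamilies.contains os = true) :
    (os, pvOsFamilies.getD os []) ∈ pvOsFamilies.items := by
  revert h
  by_cases h1 : os = "darwin"; · subst h1; intro _; decide
  by_cases h2 : os = "posix"; · subst h2; intro _; decide
  by_cases h3 : os = "linux"; · subst h3; intro _; decide
  intro h
  exfalso
  have : os ∈ pvOsFamilies.keys := by
    rw [← PySem.Dict.contains_iff_mem_keys]; exact h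
  have hk : pvOsFamilies.keys = ["darwin", "posix", "linux"] := by decide
  rw [hk] at this
  simp at this
  tauto

-- ===== VERDICT =====
theorem is_os_raw_spec : Claim_equal_is_os_raw := by
  intro t l _
  show is_os_raw t l = is_os_raw_alt t l
  rw [Bool.eq_iff_iff]
  unfold is_os_raw is_os_raw_alt
  rw [isOsRawLoop_iff]
  simp only [Bool.not_eq_true', ← Bool.not_eq_true, PySem.Set.isdisjoint_iff]
  simp only [not_forall, not_not]
  constructor
  · rintro ⟨os, h1, (rfl | ⟨h2, h3⟩)⟩
    · refine ⟨os, ?_, h1⟩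
      rw [mem_fold_accepting]
      simp
    · refine ⟨os, ?_, h1⟩
      rw [mem_fold_accepting]
      have hit := lookup_item os h2
      refine Or.inr ⟨(os, pvOsFamilies.getD os []), hit, ?_, rfl⟩
      simpa [List.contains_iff_mem] using h3
  · rintro ⟨x, hmem, hinl⟩
    rw [mem_fold_accepting] at hmem
    rcases hmem with hx1 | ⟨fm, h1, h2, rfl⟩
    · simp only [PySem.Set.mem_ofList, List.mem_singleton] at hx1
      exact ⟨x, hinl, Or.inl hx1⟩
    · obtain ⟨hc, hg⟩ := item_lookup fm h1
      refine ⟨fm.1, hinl, Or.inr ⟨hc, ?_⟩⟩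
      rw [hg]
      simpa [List.contains_iff_mem] using h2
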